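-- pv_equiv track=rewrite | github.com/pypi-data/pypi-mirror-379 | packages/xferx/xferx-3.6.0-py3-none-any.whl/xferx/shell/commons.py | split_command_line
-- ===== SOURCE A (Python) =====
-- import string
-- import typing as t
--
-- IDENTCHARS = string.ascii_letters + string.digits + "@_"
--
-- def split_command_line(line: str) -> t.Tuple[t.Optional[str], t.Optional[str]]:
--     """
--     Split a command line into command and argument
--     """
--     line = line.strip()
--     if not line or line.startswith("#"):
--         return None, None
--     elif line[0] == '?':
--         line = f"help {line[1:]}"
--     elif line[0] == '!':
--         line = f"shell {line[1:]}"
--     elif line[0] == '@':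
--         line = f"batch {line[1:]}"
--     i, n = 0, len(line)
--     while i < n and line[i] in IDENTCHARS:
--         i = i + 1
--     cmd, arg = line[:i], line[i:].strip()
--     return cmd.upper(), arg
-- ===== SOURCE B (Python) =====
-- import string
-- import typing as t
--
-- IDENTCHARS = string.ascii_letters + string.digits + "@_"
-- _DIRECT = {'?': 'HELP', '!': 'SHELL', '@': 'BATCH'}
--
--
-- def split_command_line(line: str) -> t.Tuple[t.Optional[str], t.Optional[str]]:
--     """
--     Split a command line into command and argument
--     """
--     line = line.strip()
--     if not line or line[0] == '#':
--         return None, None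
--     cmd = _DIRECT.get(line[0])
--     if cmd is not None:
--         # '?', '!', '@' map straight to their final command; no line rewriting,
--         # no rescan of the substituted word.
--         return cmd, line[1:].strip()
--     arg = line.lstrip(IDENTCHARS)
--     return line[:len(line) - len(arg)].upper(), arg.strip()
-- ===== Notes on version B (the rewrite author's own statement) =====
-- stated objective: faster
-- what changed: B never rewrites the line: the '?'/'!'/'@' prefixes map directly to their final (command, stripped remainder) results via a table instead of substituting a word and rescanning it, and for ordinary lines the command/argument boundary comes from str.lstrip(IDENTCHARS) (length difference) instead of a hand-written per-character index-walk loop.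
import Mathlib
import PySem

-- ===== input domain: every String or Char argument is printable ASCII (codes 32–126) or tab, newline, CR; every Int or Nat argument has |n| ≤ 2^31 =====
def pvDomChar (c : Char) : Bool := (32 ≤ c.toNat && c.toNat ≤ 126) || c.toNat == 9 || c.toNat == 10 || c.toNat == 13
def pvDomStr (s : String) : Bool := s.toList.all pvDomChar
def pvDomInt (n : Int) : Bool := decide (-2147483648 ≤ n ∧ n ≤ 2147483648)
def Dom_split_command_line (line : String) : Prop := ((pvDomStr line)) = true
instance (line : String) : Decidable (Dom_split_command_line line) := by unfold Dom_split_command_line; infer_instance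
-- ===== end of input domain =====

-- B never rewrites the line: '?'/'!'/'@' map straight to their final result via a table
-- (no substitution + rescan), and the command/argument boundary for ordinary lines comes
-- from lstrip(IDENTCHARS) (length difference) instead of an index-walk loop; objective: faster
-- by a constant factor (library lstrip vs a per-character Python loop; measured).

-- ===== PORT A =====
-- IDENTCHARS = string.ascii_letters + string.digits + "@_"
def pvIdentchars : List Char :=
  "abcdefghijklmnopqrstuvwxyzABCDEFGHIJKLMNOPQRSTUVWXYZ0123456789@_".toList

-- while i < n and line[i] in IDENTCHARS: i = i + 1
def pvScanA (cs : List Char) (n i : Nat) : Nat :=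
  if i < n then
    if pvIdentchars.contains ((PySem.List.pyGet? cs (i : Int)).getD ' ') then
      pvScanA cs n (i + 1)
    else i
  else i
termination_by n - i

def split_command_line (line : String) : Option String × Option String :=
  let cs := PySem.Chars.strip line.toList
  if cs.isEmpty || PySem.Chars.startswith cs ['#'] then (none, none)
  else
    let cs :=
      if PySem.List.pyGet? cs 0 = some '?' then "help ".toList ++ PySem.List.slice cs (some 1) none
      else if PySem.List.pyGet? cs 0 = some '!' then "shell ".toList ++ PySem.List.slice cs (some 1) none
      else if PySem.List.pyGet? cs 0 = some '@' then "batch ".toList ++ PySem.List.slice cs (some 1) none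
      else cs
    let n := cs.length
    let i := pvScanA cs n 0
    (some (String.mk (PySem.Chars.upper (PySem.List.slice cs none (some (i : Int))))),
     some (String.mk (PySem.Chars.strip (PySem.List.slice cs (some (i : Int)) none))))

-- ===== PORT B =====
-- _DIRECT = {'?': 'HELP', '!': 'SHELL', '@': 'BATCH'}
def pvDirect : PySem.Dict Char (List Char) :=
  PySem.Dict.ofList [('?', "HELP".toList), ('!', "SHELL".toList), ('@', "BATCH".toList)]

-- IDENTCHARS, the class handed to str.lstrip
def pvIdentSet : List Char :=
  "abcdefghijklmnopqrstuvwxyzABCDEFGHIJKLMNOPQRSTUVWXYZ0123456789@_".toList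

def split_command_line_alt (line : String) : Option String × Option String :=
  match PySem.Chars.strip line.toList with
  | [] => (none, none)
  | c :: rest =>
    if c = '#' then (none, none)
    else
      match PySem.Dict.get? pvDirect c with
      | some cmd => (some (String.mk cmd), some (String.mk (PySem.Chars.strip rest)))
      | none =>
        let cs := c :: rest
        -- line.lstrip(IDENTCHARS): drop the leading identifier-class run (exact)
        let arg := cs.dropWhile pvIdentSet.contains
        (some (String.mk (PySem.Chars.upper (cs.take (cs.length - arg.length)))),
         some (String.mk (PySem.Chars.strip arg)))

-- ===== PRECONDITION & SPEC =====
def Spec_split_command_line (line : String) (out : Option String × Option String) : Prop := out = split_command_line_alt line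
instance (line : String) (out : Option String × Option String) : Decidable (Spec_split_command_line line out) := by unfold Spec_split_command_line; infer_instance

-- ===== CLAIM (what is proved, stated in full; the proofs are below) =====
def Claim_equal_split_command_line : Prop := ∀ (line : String), Dom_split_command_line line → Spec_split_command_line line (split_command_line line)

-- ===== LEMMAS AND PROOFS =====

theorem scanA_eq (cs : List Char) (i : Nat) (hi : i ≤ cs.length) :
    pvScanA cs cs.length i = i + ((cs.drop i).takeWhile pvIdentchars.contains).length := by
  fun_induction pvScanA cs cs.length i with
  | case1 i h hin ih =>
      have hlt : i < cs.length := h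
      rw [List.drop_eq_getElem_cons hlt]
      have hget : (PySem.List.pyGet? cs (i : Int)).getD ' ' = cs[i] := by
        simp [hlt]
      rw [hget] at hin
      rw [List.contains_iff_mem] at hin
      rw [ih (by omega), List.takeWhile_cons_of_pos (by simpa using hin)]
      simp
      omega
  | case2 i h hin =>
      have hlt : i < cs.length := h
      rw [List.drop_eq_getElem_cons hlt]
      have hget : (PySem.List.pyGet? cs (i : Int)).getD ' ' = cs[i] := by
        simp [hlt]
      rw [hget] at hin
      rw [List.contains_iff_mem] at hin
      rw [List.takeWhile_cons_of_neg (by simpa using hin)]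
      simp
  | case3 i h =>
      have : i = cs.length := by omega
      simp [this]

theorem take_len_takeWhile {α : Type} (p : α → Bool) (l : List α) :
    l.take (l.takeWhile p).length = l.takeWhile p := by
  induction l with
  | nil => simp
  | cons a l ih => by_cases hp : p a <;> simp [hp, ih]

theorem drop_len_takeWhile {α : Type} (p : α → Bool) (l : List α) :
    l.drop (l.takeWhile p).length = l.dropWhile p := by
  induction l with
  | nil => simp
  | cons a l ih => by_cases hp : p a <;> simp [List.takeWhile_cons, hp, ih]

-- A's index scan followed by take / drop computes takeWhile / dropWhile over IDENTCHARS
theorem finish_scan (L : List Char) :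
    String.mk (PySem.Chars.upper (L.take (pvScanA L L.length 0)))
      = String.mk (PySem.Chars.upper (L.takeWhile pvIdentchars.contains))
    ∧ String.mk (PySem.Chars.strip (L.drop (pvScanA L L.length 0)))
      = String.mk (PySem.Chars.strip (L.dropWhile pvIdentchars.contains)) := by
  have h0 := scanA_eq L 0 (Nat.zero_le _)
  simp only [Nat.zero_add, List.drop_zero] at h0
  rw [h0, take_len_takeWhile, drop_len_takeWhile]
  exact ⟨rfl, rfl⟩

-- B's lstrip length arithmetic recovers takeWhile
theorem take_sub_dropWhile {α : Type} (p : α → Bool) (l : List α) :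
    l.take (l.length - (l.dropWhile p).length) = l.takeWhile p := by
  have hlen := congrArg List.length (List.takeWhile_append_dropWhile (p := p) (l := l))
  simp only [List.length_append] at hlen
  have : l.length - (l.dropWhile p).length = (l.takeWhile p).length := by omega
  rw [this, take_len_takeWhile]

theorem strip_space_cons (t : List Char) :
    PySem.Chars.strip (' ' :: t) = PySem.Chars.strip t := by
  simp [PySem.Chars.strip, PySem.Chars.lstrip, show PySem.Chars.isspace ' ' = true from rfl]

-- ===== VERDICT (by name: the statement is the Claim_ definition above) =====
theorem split_command_line_spec : Claim_equal_split_command_line := by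
  intro line _
  unfold Spec_split_command_line split_command_line split_command_line_alt
  cases h : PySem.Chars.strip line.toList with
  | nil => simp
  | cons c rest =>
    by_cases hc : c = '#'
    · subst hc
      simp [PySem.Chars.startswith_iff, List.cons_prefix_cons]
    · have hsw : PySem.Chars.startswith (c :: rest) ['#'] = false := by
        rw [Bool.eq_false_iff]
        intro hT
        exact hc (List.cons_prefix_cons.mp ((PySem.Chars.startswith_iff _ _).mp hT)).1.symm
      by_cases h1 : c = '?'
      · subst h1
        have hD : PySem.Dict.get? pvDirect '?' = some "HELP".toList := rfl
        have htw : List.takeWhile pvIdentchars.contains ('h' :: 'e' :: 'l' :: 'p' :: ' ' :: rest) = ['h', 'e', 'l', 'p'] := by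
          rw [
              List.takeWhile_cons_of_pos (by decide),
              List.takeWhile_cons_of_pos (by decide),
              List.takeWhile_cons_of_pos (by decide),
              List.takeWhile_cons_of_pos (by decide),
              List.takeWhile_cons_of_neg (by decide)]
        have hdw : List.dropWhile pvIdentchars.contains ('h' :: 'e' :: 'l' :: 'p' :: ' ' :: rest) = ' ' :: rest := by
          rw [
              List.dropWhile_cons_of_pos (by decide),
              List.dropWhile_cons_of_pos (by decide),
              List.dropWhile_cons_of_pos (by decide),
              List.dropWhile_cons_of_pos (by decide),
              List.dropWhile_cons_of_neg (by decide)]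
        have hfin := finish_scan ('h' :: 'e' :: 'l' :: 'p' :: ' ' :: rest)
        rw [htw, hdw, strip_space_cons] at hfin
        have hu : String.mk (PySem.Chars.upper ['h', 'e', 'l', 'p']) = String.mk ['H', 'E', 'L', 'P'] := by decide
        rw [hu] at hfin
        simp only [List.length_cons] at hfin
        simp [hsw, hD, PySem.List.pyGet?, PySem.List.pyIdx?, PySem.List.slice_from_one, hfin.1, hfin.2]
      · by_cases h2 : c = '!'
        · subst h2
          have hD : PySem.Dict.get? pvDirect '!' = some "SHELL".toList := rfl
          have htw : List.takeWhile pvIdentchars.contains ('s' :: 'h' :: 'e' :: 'l' :: 'l' :: ' ' :: rest) = ['s', 'h', 'e', 'l', 'l'] := by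
            rw [
                List.takeWhile_cons_of_pos (by decide),
                List.takeWhile_cons_of_pos (by decide),
                List.takeWhile_cons_of_pos (by decide),
                List.takeWhile_cons_of_pos (by decide),
                List.takeWhile_cons_of_pos (by decide),
                List.takeWhile_cons_of_neg (by decide)]
          have hdw : List.dropWhile pvIdentchars.contains ('s' :: 'h' :: 'e' :: 'l' :: 'l' :: ' ' :: rest) = ' ' :: rest := by
            rw [
                List.dropWhile_cons_of_pos (by decide),
                List.dropWhile_cons_of_pos (by decide),
                List.dropWhile_cons_of_pos (by decide),
                List.dropWhile_cons_of_pos (by decide),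
                List.dropWhile_cons_of_pos (by decide),
                List.dropWhile_cons_of_neg (by decide)]
          have hfin := finish_scan ('s' :: 'h' :: 'e' :: 'l' :: 'l' :: ' ' :: rest)
          rw [htw, hdw, strip_space_cons] at hfin
          have hu : String.mk (PySem.Chars.upper ['s', 'h', 'e', 'l', 'l']) = String.mk ['S', 'H', 'E', 'L', 'L'] := by decide
          rw [hu] at hfin
          simp only [List.length_cons] at hfin
          simp [hsw, hD, PySem.List.pyGet?, PySem.List.pyIdx?, PySem.List.slice_from_one, hfin.1, hfin.2]
        · by_cases h3 : c = '@'
          · subst h3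
            have hD : PySem.Dict.get? pvDirect '@' = some "BATCH".toList := rfl
            have htw : List.takeWhile pvIdentchars.contains ('b' :: 'a' :: 't' :: 'c' :: 'h' :: ' ' :: rest) = ['b', 'a', 't', 'c', 'h'] := by
              rw [
                  List.takeWhile_cons_of_pos (by decide),
                  List.takeWhile_cons_of_pos (by decide),
                  List.takeWhile_cons_of_pos (by decide),
                  List.takeWhile_cons_of_pos (by decide),
                  List.takeWhile_cons_of_pos (by decide),
                  List.takeWhile_cons_of_neg (by decide)]
            have hdw : List.dropWhile pvIdentchars.contains ('b' :: 'a' :: 't' :: 'c' :: 'h' :: ' ' :: rest) = ' ' :: rest := by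
              rw [
                  List.dropWhile_cons_of_pos (by decide),
                  List.dropWhile_cons_of_pos (by decide),
                  List.dropWhile_cons_of_pos (by decide),
                  List.dropWhile_cons_of_pos (by decide),
                  List.dropWhile_cons_of_pos (by decide),
                  List.dropWhile_cons_of_neg (by decide)]
            have hfin := finish_scan ('b' :: 'a' :: 't' :: 'c' :: 'h' :: ' ' :: rest)
            rw [htw, hdw, strip_space_cons] at hfin
            have hu : String.mk (PySem.Chars.upper ['b', 'a', 't', 'c', 'h']) = String.mk ['B', 'A', 'T', 'C', 'H'] := by decide
            rw [hu] at hfin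
            simp only [List.length_cons] at hfin
            simp [hsw, hD, PySem.List.pyGet?, PySem.List.pyIdx?, PySem.List.slice_from_one, hfin.1, hfin.2]
          · have e1 : ('?' == c) = false := beq_eq_false_iff_ne.mpr (fun e => h1 e.symm)
            have e2 : ('!' == c) = false := beq_eq_false_iff_ne.mpr (fun e => h2 e.symm)
            have e3 : ('@' == c) = false := beq_eq_false_iff_ne.mpr (fun e => h3 e.symm)
            have hit : pvDirect.items = [('?', "HELP".toList), ('!', "SHELL".toList), ('@', "BATCH".toList)] := rfl
            have hD : PySem.Dict.get? pvDirect c = none := by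
              simp [PySem.Dict.get?, hit, List.find?, e1, e2, e3]
            simp only [hsw, hD, hc, PySem.List.pyGet?, PySem.List.pyIdx?]
            have hfin := finish_scan (c :: rest)
            have ht := take_sub_dropWhile pvIdentchars.contains (c :: rest)
            have hident : pvIdentSet = pvIdentchars := rfl
            simp only [List.length_cons] at hfin ht
            simp [h1, h2, h3, hident, ht, hfin.1, hfin.2]
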